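-- pv_equiv track=rewrite | github.com/daniel-reich/ubiquitous-fiesta | xFme9FBuvHLveh5nE_6.py | is_zygodrome
-- ===== SOURCE A (Python) =====
-- def is_zygodrome(num):
--   word = str(num)
--   counter = 1
--   for i, v in enumerate(word):
--     if i != len(word) - 1:
--       if counter == 1 and v != word[i+1]:
--         return False
--       elif v == word[i+1]:
--         counter += 1
--       else:
--         counter = 1
--     elif counter == 1:
--       return False
--     else:
--       return True
-- ===== SOURCE B (Python) =====
-- def is_zygodrome(num):
--     # Scan maximal runs of equal characters; every run must have length >= 2.
--     w = str(num)
--     n = len(w)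
--     i = 0
--     while i < n:
--         j = i
--         while j < n and w[j] == w[i]:
--             j += 1
--         if j - i < 2:
--             return False
--         i = j
--     return True
-- ===== Notes on version B (the rewrite author's own statement) =====
-- stated objective: alternative
-- what changed: Replaced A's single-pass state machine (running counter plus word[i+1] lookahead, with early returns on every branch) by a run-scanning loop that jumps from one maximal run of equal characters to the next and checks each run's length >= 2.
import Mathlib
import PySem

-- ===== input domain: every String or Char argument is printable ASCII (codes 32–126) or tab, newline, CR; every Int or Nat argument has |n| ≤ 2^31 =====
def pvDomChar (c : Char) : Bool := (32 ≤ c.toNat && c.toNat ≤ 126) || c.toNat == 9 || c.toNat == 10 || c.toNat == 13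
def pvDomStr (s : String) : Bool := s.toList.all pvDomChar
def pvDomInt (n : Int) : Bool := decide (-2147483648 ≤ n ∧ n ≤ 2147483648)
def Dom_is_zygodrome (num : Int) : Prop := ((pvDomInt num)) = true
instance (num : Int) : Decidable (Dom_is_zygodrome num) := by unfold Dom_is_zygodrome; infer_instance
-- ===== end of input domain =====

-- B replaces A's counter-and-lookahead state machine by a loop over maximal runs of
-- equal characters (objective: alternative decomposition, same O(n) cost).

-- ===== PORT A =====
-- the for-loop of A: state = remaining characters (head = current v, next element = word[i+1]) and counter
def zygoLoopA : List Char → Nat → Bool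
  | [], _ => false                 -- unreachable: str(num) is never empty (Python would return None here)
  | [_], counter => if counter == 1 then false else true
  | v :: w :: rest, counter =>
      if counter == 1 && v != w then false
      else if v == w then zygoLoopA (w :: rest) (counter + 1)
      else zygoLoopA (w :: rest) 1

def is_zygodrome (num : Int) : Bool :=
  zygoLoopA (PySem.Int.toStr num).toList 1

-- ===== PORT B =====
-- inner while: length of the run of characters equal to c at the front of w
def zygoRunB (c : Char) : List Char → Nat
  | [] => 0
  | x :: xs => if x == c then 1 + zygoRunB c xs else 0

-- outer while: check each maximal run and jump past it
def zygoLoopB : List Char → Bool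
  | [] => true
  | c :: w =>
      let k := 1 + zygoRunB c w
      if k < 2 then false else zygoLoopB (w.drop (k - 1))
  termination_by w => w.length
  decreasing_by simp [List.length_drop]

def is_zygodrome_alt (num : Int) : Bool :=
  zygoLoopB (PySem.Int.toStr num).toList

-- ===== PRECONDITION & SPEC =====
def Spec_is_zygodrome (num : Int) (out : Bool) : Prop := out = is_zygodrome_alt num
instance (num : Int) (out : Bool) : Decidable (Spec_is_zygodrome num out) := by unfold Spec_is_zygodrome; infer_instance

-- ===== CLAIM (what is proved, stated in full; the proofs are below) =====
def Claim_equal_is_zygodrome : Prop := ∀ (num : Int), Dom_is_zygodrome num → Spec_is_zygodrome num (is_zygodrome num)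

-- ===== LEMMAS AND PROOFS =====

-- unfolding equations for B's well-founded outer loop
theorem zygoLoopB_nil : zygoLoopB [] = true := by
  rw [zygoLoopB]

theorem zygoLoopB_cons (c : Char) (w : List Char) :
    zygoLoopB (c :: w) = if zygoRunB c w = 0 then false else zygoLoopB (w.drop (zygoRunB c w)) := by
  rw [zygoLoopB]
  rcases Nat.eq_zero_or_pos (zygoRunB c w) with h | h <;> simp [h]

-- A's loop, related to B's run scanner: with counter 1 it decides the word from scratch;
-- with counter ≥ 2 the current run is already long enough, so only the runs after it matter.
-- (A's counter is always ≥ 1, so the lemma is stated for counter = c + 1.)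
theorem zygoLoopA_eq (w : List Char) : ∀ (v : Char) (c : Nat),
    zygoLoopA (v :: w) (c + 1) =
      if c == 0 then zygoLoopB (v :: w) else zygoLoopB (w.drop (zygoRunB v w)) := by
  induction w with
  | nil =>
      intro v c
      cases c <;> simp [zygoLoopA, zygoLoopB_nil, zygoLoopB_cons, zygoRunB]
  | cons x rest ih =>
      intro v c
      by_cases hvx : v = x
      · subst hvx
        cases c with
        | zero =>
            simp only [zygoLoopA, beq_self_eq_true, bne_self_eq_false, Bool.and_false,
              Bool.false_eq_true, if_false, if_true]
            rw [show (0 + 1 + 1) = 1 + 1 from rfl, ih v 1]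
            simp only [zygoLoopB_cons, zygoRunB, beq_self_eq_true, if_true]
            rw [Nat.add_comm 1 (zygoRunB v rest), List.drop_succ_cons]
            simp
        | succ c =>
            simp only [zygoLoopA, beq_self_eq_true, bne_self_eq_false, Bool.and_false,
              Bool.false_eq_true, if_false, if_true]
            rw [show (c + 1 + 1 + 1) = (c + 2) + 1 from rfl, ih v (c + 2)]
            have : zygoRunB v (v :: rest) = zygoRunB v rest + 1 := by
              simp [zygoRunB, Nat.add_comm]
            simp [this, List.drop_succ_cons]
      · have hne : (v == x) = false := by simp [hvx]
        have hne' : (x == v) = false := by simp [Ne.symm hvx]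
        have hrun : zygoRunB v (x :: rest) = 0 := by simp [zygoRunB, hne']
        cases c with
        | zero =>
            simp [zygoLoopA, zygoLoopB_cons, hne, hrun]
            exact fun h => absurd h hvx
        | succ c =>
            simp only [zygoLoopA, hne, Bool.false_eq_true, if_false,
              Nat.succ_ne_zero, beq_iff_eq, Nat.add_eq_right, Bool.and_eq_true]
            rw [show (1 : Nat) = 0 + 1 from rfl, ih x 0]
            simp [hrun, hvx]

theorem toChars_ne_nil (n : Int) : PySem.Int.toChars n ≠ [] := by
  unfold PySem.Int.toChars
  split
  · simp
  · have := @Nat.length_toDigits_pos 10 n.toNat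
    intro h
    simp [h] at this

-- ===== VERDICT (by name: the statement is the Claim_ definition above) =====
theorem is_zygodrome_spec : Claim_equal_is_zygodrome := by
  intro num _
  unfold Spec_is_zygodrome is_zygodrome is_zygodrome_alt
  rw [PySem.Int.toList_toStr]
  rcases h : PySem.Int.toChars num with _ | ⟨v, w⟩
  · exact absurd h (toChars_ne_nil num)
  · simpa using zygoLoopA_eq w v 0
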